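-- pv_equiv track=rewrite | github.com/dturaev/pairtext | pairtext/utils.py | _concat_sentences
-- ===== SOURCE A (Python) =====
-- def _concat_sentences(
--     sentences: list[str], max_concat_length: int | None = None, bound: str | None = None
-- ) -> tuple[list[str], list[list[int]]]:
--     """Create all possible concatenations of successive sentences.
--
--     >>> _concat_sentences(["a", "b", "c"])
--     (['a b', 'b c', 'a b c', [[0, 1], [1, 2], [0, 1, 2]])
--     >>> _concat_sentences(["a", "b", "c", "d"], bound="right")
--     (['c d', 'b c d', 'a b c d'], [[2, 3], [1, 2, 3], [0, 1, 2, 3]])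
--     """
--     if max_concat_length is None:
--         max_concat_length = len(sentences)
--     if bound == "both":
--         bound = None
--
--     sentences_concat = []
--     indices = []
--     for n_sents in range(1, max_concat_length):
--         for i in range(len(sentences) - n_sents):
--
--             if bound == "left" and i > 0:
--                 continue
--             if bound == "right" and i < len(sentences) - n_sents - 1:
--                 continue
--
--             concat = " ".join(sentences[i : i + n_sents + 1])
--             sentences_concat.append(concat)
--             indices.append([i for i in range(i, i + n_sents + 1)])
--
--     return sentences_concat, indices
-- ===== SOURCE B (Python) =====
-- def _concat_sentences(sentences, max_concat_length=None, bound=None):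
--     """Rolling-window reconstruction: windows of length L are built by extending
--     the windows of length L-1 with one more sentence, instead of re-joining a
--     slice for every window."""
--     n = len(sentences)
--     mcl = n if max_concat_length is None else max_concat_length
--     if bound == "both":
--         bound = None
--     out_s, out_i = [], []
--     windows = list(sentences)
--     L = 2
--     while L <= mcl and L <= n:
--         new = []
--         for i, (w0, nxt) in enumerate(zip(windows, sentences[L - 1:])):
--             w = w0 + " " + nxt
--             new.append(w)
--             if bound == "left" and i > 0:
--                 continue
--             if bound == "right" and i != n - L:
--                 continue
--             out_s.append(w)
--             out_i.append(list(range(i, i + L)))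
--         windows = new
--         L += 1
--     return out_s, out_i
-- ===== Notes on version B (the rewrite author's own statement) =====
-- stated objective: alternative
-- what changed: B keeps a rolling list of current windows and extends each by one sentence per length step (stopping as soon as windows no longer fit), instead of A's re-joining a fresh slice for every (length, start) pair.
import Mathlib
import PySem

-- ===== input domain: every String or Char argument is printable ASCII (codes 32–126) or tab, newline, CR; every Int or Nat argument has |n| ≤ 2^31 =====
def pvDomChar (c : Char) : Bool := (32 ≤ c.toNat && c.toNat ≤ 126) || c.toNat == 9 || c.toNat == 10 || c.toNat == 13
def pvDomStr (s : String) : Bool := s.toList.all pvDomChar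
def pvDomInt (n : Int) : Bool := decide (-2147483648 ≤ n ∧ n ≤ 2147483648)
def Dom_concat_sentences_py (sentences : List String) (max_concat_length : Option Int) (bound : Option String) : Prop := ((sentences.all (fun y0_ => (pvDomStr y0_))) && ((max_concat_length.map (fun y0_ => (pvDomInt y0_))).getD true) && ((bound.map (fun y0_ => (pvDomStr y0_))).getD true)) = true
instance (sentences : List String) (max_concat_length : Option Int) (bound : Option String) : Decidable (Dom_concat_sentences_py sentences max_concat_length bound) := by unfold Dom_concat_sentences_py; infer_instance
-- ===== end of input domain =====

-- B rebuilds each window length incrementally (extending the previous length's windows by one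
-- sentence and stopping once windows no longer fit) instead of re-joining a slice per window;
-- objective: alternative decomposition.


-- ===== PORT A =====
def concat_sentences_py (sentences : List String) (max_concat_length : Option Int) (bound : Option String) : List String × List (List Int) :=
  let n : Int := sentences.length
  let mcl : Int := max_concat_length.getD n
  let bd : Option String := if bound = some "both" then none else bound
  (PySem.List.pyRange 1 mcl 1).foldl (fun acc n_sents =>
    (PySem.List.pyRange 0 (n - n_sents) 1).foldl (fun acc i =>
      if bd = some "left" ∧ 0 < i then acc
      else if bd = some "right" ∧ i < n - n_sents - 1 then acc
      else (acc.1 ++ [PySem.Str.join " " (PySem.List.slice sentences (some i) (some (i + n_sents + 1)))],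
            acc.2 ++ [PySem.List.pyRange i (i + n_sents + 1) 1])) acc) ([], [])

-- ===== PORT B =====
-- the while-loop of Source B: the windows of length L-1 are each extended by one sentence per iteration
def concat_sentences_py_altGo (sentences : List String) (n mcl : Int) (bd : Option String)
    (windows : List String) (L : Int) (acc : List String × List (List Int)) :
    List String × List (List Int) :=
  if h : L ≤ mcl ∧ L ≤ n then
    let step := (PySem.List.enumerate (windows.zip (PySem.List.slice sentences (some (L - 1)) none)) 0).foldl
      (fun (st : List String × (List String × List (List Int))) p =>
        -- w0 + " " + nxt ported on code points (String.ofList/toList; exact)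
        let w := String.ofList (p.2.1.toList ++ ' ' :: p.2.2.toList)
        let new := st.1 ++ [w]
        if bd = some "left" ∧ 0 < p.1 then (new, st.2)
        else if bd = some "right" ∧ p.1 ≠ n - L then (new, st.2)
        else (new, (st.2.1 ++ [w], st.2.2 ++ [PySem.List.pyRange p.1 (p.1 + L) 1])))
      ([], acc)
    concat_sentences_py_altGo sentences n mcl bd step.1 (L + 1) step.2
  else acc
termination_by (n + 1 - L).toNat
decreasing_by omega

def concat_sentences_py_alt (sentences : List String) (max_concat_length : Option Int) (bound : Option String) : List String × List (List Int) :=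
  let n : Int := sentences.length
  let mcl : Int := max_concat_length.getD n
  let bd : Option String := if bound = some "both" then none else bound
  concat_sentences_py_altGo sentences n mcl bd sentences 2 ([], [])

-- ===== PRECONDITION & SPEC =====
def Spec_concat_sentences_py (sentences : List String) (max_concat_length : Option Int) (bound : Option String) (out : List String × List (List Int)) : Prop := out = concat_sentences_py_alt sentences max_concat_length bound
instance (sentences : List String) (max_concat_length : Option Int) (bound : Option String) (out : List String × List (List Int)) : Decidable (Spec_concat_sentences_py sentences max_concat_length bound out) := by unfold Spec_concat_sentences_py; infer_instance

-- ===== CLAIM (what is proved, stated in full; the proofs are below) =====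
def Claim_equal_concat_sentences_py : Prop := ∀ (sentences : List String) (max_concat_length : Option Int) (bound : Option String), Dom_concat_sentences_py sentences max_concat_length bound → Spec_concat_sentences_py sentences max_concat_length bound (concat_sentences_py sentences max_concat_length bound)

-- ===== LEMMAS AND PROOFS =====

-- canonical description of one "row": all emitted windows of a fixed length L
def pvKeep (bd : Option String) (n L i : Int) : Bool :=
  !((bd == some "left") && decide (0 < i)) && !((bd == some "right") && decide (i < n - L))

def pvWin (ss : List String) (i L : Int) : String :=
  String.ofList (PySem.Chars.join [' '] ((PySem.List.slice ss (some i) (some (i + L))).map String.toList))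

def pvRowIdx (n : Int) (bd : Option String) (L : Int) : List Int :=
  (PySem.List.pyRange 0 (n - L + 1) 1).filter (pvKeep bd n L)

def pvRowS (ss : List String) (bd : Option String) (L : Int) : List String :=
  (pvRowIdx (ss.length : Int) bd L).map (fun i => pvWin ss i L)

def pvRowI (n : Int) (bd : Option String) (L : Int) : List (List Int) :=
  (pvRowIdx n bd L).map (fun i => PySem.List.pyRange i (i + L) 1)

-- generic fold shapes
theorem pvFoldEmit {α : Type} (l : List α) (p : α → Bool) (f : α → String) (g : α → List Int)
    (acc : List String × List (List Int)) :
    l.foldl (fun acc i => if p i = true then (acc.1 ++ [f i], acc.2 ++ [g i]) else acc) acc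
      = (acc.1 ++ (l.filter p).map f, acc.2 ++ (l.filter p).map g) := by
  induction l generalizing acc with
  | nil => simp
  | cons x t ih => by_cases h : p x = true <;> simp [h, ih]

theorem pvFoldEmit2 {α : Type} (l : List α) (p : α → Bool) (F : α → String) (g : α → List Int)
    (ws : List String) (acc : List String × List (List Int)) :
    l.foldl (fun st x => (st.1 ++ [F x], if p x = true then (st.2.1 ++ [F x], st.2.2 ++ [g x]) else st.2)) (ws, acc)
      = (ws ++ l.map F, (acc.1 ++ (l.filter p).map F, acc.2 ++ (l.filter p).map g)) := by
  induction l generalizing ws acc with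
  | nil => simp
  | cons x t ih => by_cases h : p x = true <;> simp [h, ih]

theorem pvFoldRow {α : Type} (l : List α) (S : α → List String) (I : α → List (List Int))
    (acc : List String × List (List Int)) :
    l.foldl (fun acc x => (acc.1 ++ S x, acc.2 ++ I x)) acc = (acc.1 ++ l.flatMap S, acc.2 ++ l.flatMap I) := by
  induction l generalizing acc with
  | nil => simp
  | cons x t ih => simp [ih]

theorem pvRangeShift (a b c : Int) :
    (PySem.List.pyRange a b 1).map (· + c) = PySem.List.pyRange (a + c) (b + c) 1 := by
  rw [PySem.List.pyRange_one, PySem.List.pyRange_one, List.map_map]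
  have h : b + c - (a + c) = b - a := by ring
  rw [h]; apply List.map_congr_left; intro k _; simp; ring

-- join-snoc: appending one more part to a nonempty " ".join
theorem pvJoinSnoc (xs : List (List Char)) (y : List Char) (h : xs ≠ []) :
    PySem.Chars.join [' '] (xs ++ [y]) = PySem.Chars.join [' '] xs ++ ' ' :: y := by
  induction xs with
  | nil => simp at h
  | cons a t ih =>
    cases t with
    | nil => simp [PySem.Chars.join, List.intercalate]
    | cons b u =>
      have := ih (by simp)
      simp [PySem.Chars.join, List.intercalate] at this ⊢
      simp [this]

-- the window-extension step of B equals one longer joined slice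
theorem pvWinExt (ss : List String) (i L : Int) (h0 : 0 ≤ i) (h2 : 2 ≤ L)
    (hle : i + L ≤ (ss.length : Int)) :
    String.ofList ((pvWin ss i (L - 1)).toList ++ ' ' :: (PySem.List.pyGetD ss (i + (L - 1)) "").toList)
      = pvWin ss i L := by
  unfold pvWin
  rw [String.toList_ofList]
  set k := i.toNat with hk
  set l := L.toNat with hl
  have h1 : PySem.List.slice ss (some i) (some (i + L)) = (ss.drop k).take l := by
    rw [PySem.List.slice_toNat ss h0 (by omega)]
    congr 1; omega
  have h2' : PySem.List.slice ss (some i) (some (i + (L - 1))) = (ss.drop k).take (l - 1) := by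
    rw [PySem.List.slice_toNat ss h0 (by omega)]
    congr 1; omega
  have hlen : k + l ≤ ss.length := by omega
  have hget : (ss.drop k)[l - 1]? = some (ss.getD (k + (l - 1)) "") := by
    rw [List.getElem?_drop]
    rw [List.getElem?_eq_getElem (by omega)]
    rw [List.getD_eq_getElem?_getD, List.getElem?_eq_getElem (by omega)]
    rfl
  have htake : (ss.drop k).take l = (ss.drop k).take (l - 1) ++ [ss.getD (k + (l - 1)) ""] := by
    have : l = (l - 1) + 1 := by omega
    rw [this, List.take_add_one, hget]
    simp
  have hpg : PySem.List.pyGetD ss (i + (L - 1)) "" = ss.getD (k + (l - 1)) "" := by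
    rw [PySem.List.pyGetD_of_nonneg ss "" (by omega)]
    congr 1; omega
  rw [h1, h2', htake, hpg, List.map_append]
  simp only [List.map_cons, List.map_nil]
  rw [pvJoinSnoc _ _ (by
    have : ((ss.drop k).take (l - 1)).length = l - 1 := by
      simp [List.length_take, List.length_drop]; omega
    intro hnil
    rw [List.map_eq_nil_iff] at hnil
    rw [hnil] at this
    simp at this; omega)]

-- base windows: every sentence is its own window of length 1
theorem pvWinOne (ss : List String) :
    ss = (PySem.List.pyRange 0 ((ss.length : Int) - 1 + 1) 1).map (fun i => pvWin ss i 1) := by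
  have hr : ((ss.length : Int) - 1 + 1) = (ss.length : Int) := by ring
  rw [hr]
  have hcg : ∀ i ∈ PySem.List.pyRange 0 ((ss.length : Int)) 1,
      pvWin ss i 1 = PySem.List.pyGetD ss i "" := by
    intro i hi
    rw [PySem.List.mem_pyRange_one] at hi
    unfold pvWin
    have h1 : PySem.List.slice ss (some i) (some (i + 1)) = (ss.drop i.toNat).take 1 := by
      rw [PySem.List.slice_toNat ss hi.1 (by omega)]
      congr 1; omega
    have hget : (ss.drop i.toNat)[0]? = some (ss.getD i.toNat "") := by
      rw [List.getElem?_drop, List.getElem?_eq_getElem (by omega)]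
      rw [List.getD_eq_getElem?_getD, List.getElem?_eq_getElem (by omega)]
      rfl
    have h2 : (ss.drop i.toNat).take 1 = [ss.getD i.toNat ""] := by
      rw [show (1:Nat) = 0 + 1 by rfl, List.take_add_one, hget]
      simp
    rw [h1, h2]
    simp [PySem.Chars.join, List.intercalate]
    rw [PySem.List.pyGetD_of_nonneg ss "" hi.1]
    simp [List.getD_eq_getElem?_getD]
  rw [List.map_congr_left hcg]
  have h := PySem.List.map_pyGetD_pyRange ss "" (a := 0) (le_refl 0)
  simp [PySem.List.len] at h
  rw [h]

-- rows above the sentence count are empty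
theorem pvRowIdx_nil (n : Int) (bd : Option String) (L : Int) (h : n < L) : pvRowIdx n bd L = [] := by
  unfold pvRowIdx
  rw [PySem.List.pyRange_one_eq_nil (by omega)]; rfl

-- A's inner loop produces exactly one row
theorem pvInnerA (ss : List String) (bd : Option String) (ns : Int)
    (acc : List String × List (List Int)) :
    (PySem.List.pyRange 0 ((ss.length : Int) - ns) 1).foldl (fun acc i =>
      if bd = some "left" ∧ 0 < i then acc
      else if bd = some "right" ∧ i < (ss.length : Int) - ns - 1 then acc
      else (acc.1 ++ [PySem.Str.join " " (PySem.List.slice ss (some i) (some (i + ns + 1)))],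
            acc.2 ++ [PySem.List.pyRange i (i + ns + 1) 1])) acc
      = (acc.1 ++ pvRowS ss bd (ns + 1), acc.2 ++ pvRowI (ss.length : Int) bd (ns + 1)) := by
  have hb : (fun (acc : List String × List (List Int)) i =>
      if bd = some "left" ∧ 0 < i then acc
      else if bd = some "right" ∧ i < (ss.length : Int) - ns - 1 then acc
      else (acc.1 ++ [PySem.Str.join " " (PySem.List.slice ss (some i) (some (i + ns + 1)))],
            acc.2 ++ [PySem.List.pyRange i (i + ns + 1) 1]))
      = (fun acc i =>
        if pvKeep bd (ss.length : Int) (ns + 1) i = true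
        then (acc.1 ++ [PySem.Str.join " " (PySem.List.slice ss (some i) (some (i + ns + 1)))],
              acc.2 ++ [PySem.List.pyRange i (i + ns + 1) 1]) else acc) := by
    funext acc i
    by_cases h1 : bd = some "left" ∧ 0 < i
    · simp [h1, pvKeep]
    · by_cases h2 : bd = some "right" ∧ i < (ss.length : Int) - ns - 1
      · have : i < (ss.length : Int) - (ns + 1) := by omega
        simp [pvKeep, h2.1, this, h2.2]
      · rw [if_neg h1, if_neg h2, if_pos]
        unfold pvKeep
        rcases Decidable.not_and_iff_not_or_not.mp h1 with h | h <;>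
          rcases Decidable.not_and_iff_not_or_not.mp h2 with h' | h' <;>
          simp_all <;> omega
  rw [hb, pvFoldEmit]
  unfold pvRowS pvRowI pvRowIdx
  have hr : (ss.length : Int) - ns = (ss.length : Int) - (ns + 1) + 1 := by ring
  rw [hr]
  congr 1
  · congr 1
    apply List.map_congr_left
    intro i _
    unfold pvWin
    simp [PySem.Str.join, PySem.Chars.join]
    rw [add_assoc]
  · congr 1
    apply List.map_congr_left
    intro i _
    congr 1; ring

-- A as a flatMap of rows, length-major
theorem pvA_eq (ss : List String) (mcl? : Option Int) (bound : Option String) :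
    concat_sentences_py ss mcl? bound
      = ((PySem.List.pyRange 2 ((mcl?.getD (ss.length : Int)) + 1) 1).flatMap
            (pvRowS ss (if bound = some "both" then none else bound)),
         (PySem.List.pyRange 2 ((mcl?.getD (ss.length : Int)) + 1) 1).flatMap
            (pvRowI (ss.length : Int) (if bound = some "both" then none else bound))) := by
  dsimp only [concat_sentences_py]
  have houter : (fun (acc : List String × List (List Int)) ns =>
      (PySem.List.pyRange 0 ((ss.length : Int) - ns) 1).foldl (fun acc i =>
        if (if bound = some "both" then none else bound) = some "left" ∧ 0 < i then acc
        else if (if bound = some "both" then none else bound) = some "right" ∧ i < (ss.length : Int) - ns - 1 then acc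
        else (acc.1 ++ [PySem.Str.join " " (PySem.List.slice ss (some i) (some (i + ns + 1)))],
              acc.2 ++ [PySem.List.pyRange i (i + ns + 1) 1])) acc)
      = fun acc ns => (acc.1 ++ pvRowS ss (if bound = some "both" then none else bound) (ns + 1),
                       acc.2 ++ pvRowI (ss.length : Int) (if bound = some "both" then none else bound) (ns + 1)) := by
    funext acc ns
    exact pvInnerA ss _ ns acc
  rw [houter, pvFoldRow]
  have hsh := pvRangeShift 1 (mcl?.getD (ss.length : Int)) 1
  norm_num at hsh
  rw [← hsh]
  simp [List.flatMap_map]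

-- truncating the length range at n+1 loses only empty rows
theorem pvFlatTrunc {β : Type} (R : Int → List β) (n b : Int) (hn : 0 ≤ n)
    (h : ∀ L, n < L → R L = []) :
    (PySem.List.pyRange 2 b 1).flatMap R = (PySem.List.pyRange 2 (min b (n + 1)) 1).flatMap R := by
  by_cases hb : b ≤ n + 1
  · rw [min_eq_left hb]
  · rw [min_eq_right (by omega)]
    by_cases h2 : 1 ≤ n
    · rw [PySem.List.pyRange_one_append 2 (n + 1) b (by omega) (by omega), List.flatMap_append]
      have : (PySem.List.pyRange (n + 1) b 1).flatMap R = [] := by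
        rw [List.flatMap_eq_nil_iff]
        intro x hx
        rw [PySem.List.mem_pyRange_one] at hx
        exact h x (by omega)
      simp [this]
    · have hn0 : n = 0 := by omega
      subst hn0
      have hnil : PySem.List.pyRange 2 ((0:Int) + 1) 1 = [] := PySem.List.pyRange_one_eq_nil (by omega)
      rw [hnil, List.flatMap_nil, List.flatMap_eq_nil_iff]
      intro x hx
      rw [PySem.List.mem_pyRange_one] at hx
      exact h x (by omega)

theorem pvEnumMapRange {α : Type} (F : Int → α) (d : α) (m : Int) (hm : 0 ≤ m) :
    PySem.List.enumerate ((PySem.List.pyRange 0 m 1).map F) 0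
      = (PySem.List.pyRange 0 m 1).map (fun j => (j, F j)) := by
  rw [PySem.List.enumerate_eq_map_pyRange _ d]
  have hlen : PySem.List.len ((PySem.List.pyRange 0 m 1).map F) = m := by
    simp [PySem.List.length_pyRange_one]
    omega
  rw [hlen]
  apply List.map_congr_left
  intro j hj
  rw [PySem.List.mem_pyRange_one] at hj
  rw [PySem.List.pyGetD_eq_getElem _ _ (by omega) (by simp [PySem.List.length_pyRange_one]; omega)]
  rw [List.getElem_map, PySem.List.getElem_pyRange_one]
  congr 2
  omega

-- B's main loop, fully characterised: given the windows of length L-1 it emits the rows L, L+1, …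
theorem pvAltGo_spec (ss : List String) (mcl : Int) (bd : Option String) (L : Int)
    (acc : List String × List (List Int)) (hL : 2 ≤ L) :
    concat_sentences_py_altGo ss (ss.length : Int) mcl bd
        ((PySem.List.pyRange 0 ((ss.length : Int) - (L - 1) + 1) 1).map (fun i => pvWin ss i (L - 1))) L acc
      = (acc.1 ++ (PySem.List.pyRange L (min mcl (ss.length : Int) + 1) 1).flatMap (pvRowS ss bd),
         acc.2 ++ (PySem.List.pyRange L (min mcl (ss.length : Int) + 1) 1).flatMap (pvRowI (ss.length : Int) bd)) := by
  rw [concat_sentences_py_altGo]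
  by_cases h : L ≤ mcl ∧ L ≤ (ss.length : Int)
  case neg =>
    rw [dif_neg h]
    rw [PySem.List.pyRange_one_eq_nil (by omega)]
    simp
  case pos =>
    rw [dif_pos h]
    have e1 : (ss.length : Int) - (L - 1) + 1 = ((ss.length : Int) - L + 1) + 1 := by ring
    rw [e1]
    rw [PySem.List.slice_from ss (by omega : (0:Int) ≤ L - 1)]
    -- drop as a map over the index range
    have hdrop : ss.drop (L - 1).toNat
        = (PySem.List.pyRange 0 ((ss.length : Int) - L + 1) 1).map
            (fun i => PySem.List.pyGetD ss (i + (L - 1)) "") := by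
      have h1 := PySem.List.map_pyGetD_pyRange ss "" (a := L - 1) (by omega)
      simp only [PySem.List.len_eq] at h1
      have h2 := pvRangeShift 0 ((ss.length : Int) - L + 1) (L - 1)
      have e : (0 : Int) + (L - 1) = L - 1 := by ring
      have e' : (ss.length : Int) - L + 1 + (L - 1) = (ss.length : Int) := by ring
      rw [e, e'] at h2
      rw [← h1, ← h2, List.map_map]
      rfl
    rw [hdrop]
    -- split the windows list: the last window cannot be extended and is dropped by zip
    rw [PySem.List.pyRange_one_succ_right (by omega : (0:Int) ≤ (ss.length : Int) - L + 1),
        List.map_append]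
    rw [show (PySem.List.pyRange 0 ((ss.length : Int) - L + 1) 1).map
          (fun i => PySem.List.pyGetD ss (i + (L - 1)) "")
        = (PySem.List.pyRange 0 ((ss.length : Int) - L + 1) 1).map
            (fun i => PySem.List.pyGetD ss (i + (L - 1)) "") ++ [] by simp]
    rw [List.zip_append (by simp)]
    rw [List.zip_map']
    simp only [List.zip_nil_right, List.append_nil]
    rw [pvEnumMapRange _ (pvWin ss 0 (L-1), "") _ (by omega)]
    rw [List.foldl_map]
    -- inner loop in emit form
    dsimp only
    rw [show (fun (x : List String × (List String × List (List Int))) (y : Int) =>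
        if bd = some "left" ∧ 0 < y then
          (x.1 ++ [String.ofList ((pvWin ss y (L - 1)).toList ++ ' ' :: (PySem.List.pyGetD ss (y + (L - 1)) "").toList)], x.2)
        else if bd = some "right" ∧ y ≠ (ss.length : Int) - L then
          (x.1 ++ [String.ofList ((pvWin ss y (L - 1)).toList ++ ' ' :: (PySem.List.pyGetD ss (y + (L - 1)) "").toList)], x.2)
        else
          (x.1 ++ [String.ofList ((pvWin ss y (L - 1)).toList ++ ' ' :: (PySem.List.pyGetD ss (y + (L - 1)) "").toList)],
            x.2.1 ++ [String.ofList ((pvWin ss y (L - 1)).toList ++ ' ' :: (PySem.List.pyGetD ss (y + (L - 1)) "").toList)],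
            x.2.2 ++ [PySem.List.pyRange y (y + L) 1]))
      = fun (st : List String × (List String × List (List Int))) (y : Int) =>
          (st.1 ++ [String.ofList ((pvWin ss y (L - 1)).toList ++ ' ' :: (PySem.List.pyGetD ss (y + (L - 1)) "").toList)],
           if (!((bd == some "left") && decide (0 < y)) &&
               !((bd == some "right") && decide (y ≠ (ss.length : Int) - L))) = true then
             (st.2.1 ++ [String.ofList ((pvWin ss y (L - 1)).toList ++ ' ' :: (PySem.List.pyGetD ss (y + (L - 1)) "").toList)],
              st.2.2 ++ [PySem.List.pyRange y (y + L) 1])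
           else st.2) from by
      funext st y
      by_cases h1 : bd = some "left" ∧ 0 < y
      · simp [h1]
      · by_cases h2 : bd = some "right" ∧ y ≠ (ss.length : Int) - L
        · simp [h2]
        · rw [if_neg h1, if_neg h2]
          rcases Decidable.not_and_iff_not_or_not.mp h1 with h' | h' <;>
            rcases Decidable.not_and_iff_not_or_not.mp h2 with h'' | h'' <;>
            simp_all]
    rw [pvFoldEmit2]
    have hW : ∀ y ∈ PySem.List.pyRange 0 ((ss.length : Int) - L + 1) 1,
        String.ofList ((pvWin ss y (L - 1)).toList ++ ' ' :: (PySem.List.pyGetD ss (y + (L - 1)) "").toList)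
          = pvWin ss y L := by
      intro y hy
      rw [PySem.List.mem_pyRange_one] at hy
      exact pvWinExt ss y L hy.1 hL (by omega)
    have hfilter : (PySem.List.pyRange 0 ((ss.length : Int) - L + 1) 1).filter
        (fun y => !(bd == some "left" && decide (0 < y)) && !(bd == some "right" && decide (y ≠ (ss.length : Int) - L)))
        = pvRowIdx (ss.length : Int) bd L := by
      unfold pvRowIdx pvKeep
      apply List.filter_congr
      intro y hy
      rw [PySem.List.mem_pyRange_one] at hy
      have : decide (y ≠ (ss.length : Int) - L) = decide (y < (ss.length : Int) - L) := by
        rw [decide_eq_decide]; omega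
      rw [this]
    dsimp only
    rw [List.nil_append, List.map_congr_left hW, hfilter]
    rw [show (pvRowIdx (ss.length : Int) bd L).map
          (fun y => String.ofList ((pvWin ss y (L - 1)).toList ++ ' ' :: (PySem.List.pyGetD ss (y + (L - 1)) "").toList))
        = pvRowS ss bd L from by
      unfold pvRowS
      exact List.map_congr_left fun y hy => hW y (List.mem_filter.mp hy).1]
    rw [show (pvRowIdx (ss.length : Int) bd L).map (fun y => PySem.List.pyRange y (y + L) 1)
        = pvRowI (ss.length : Int) bd L from rfl]
    have IH := pvAltGo_spec ss mcl bd (L + 1)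
        (acc.1 ++ pvRowS ss bd L, acc.2 ++ pvRowI (ss.length : Int) bd L) (by omega)
    rw [show (L : Int) + 1 - 1 = L by ring] at IH
    rw [IH]
    rw [PySem.List.pyRange_one_cons (by omega : L < min mcl (ss.length : Int) + 1)]
    simp [List.flatMap_cons]
termination_by ((ss.length : Int) + 1 - L).toNat
decreasing_by omega

-- ===== VERDICT (by name: the statement is the Claim_ definition above) =====
theorem concat_sentences_py_spec : Claim_equal_concat_sentences_py := by
  intro ss mcl? bound _
  unfold Spec_concat_sentences_py
  rw [pvA_eq]
  show _ = concat_sentences_py_alt ss mcl? bound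
  unfold concat_sentences_py_alt
  have hbase := pvWinOne ss
  have hgo := pvAltGo_spec ss (mcl?.getD (ss.length : Int))
      (if bound = some "both" then none else bound) 2 ([], []) (le_refl 2)
  rw [show ((2:Int) - 1) = 1 by norm_num] at hgo
  rw [← hbase] at hgo
  rw [hgo]
  have hS := pvFlatTrunc (pvRowS ss (if bound = some "both" then none else bound)) (ss.length : Int)
      ((mcl?.getD (ss.length : Int)) + 1) (by positivity)
      (fun L hL => by simp [pvRowS, pvRowIdx_nil _ _ _ hL])
  have hI := pvFlatTrunc (pvRowI (ss.length : Int) (if bound = some "both" then none else bound)) (ss.length : Int)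
      ((mcl?.getD (ss.length : Int)) + 1) (by positivity)
      (fun L hL => by simp [pvRowI, pvRowIdx_nil _ _ _ hL])
  rw [hS, hI]
  have : min ((mcl?.getD (ss.length : Int)) + 1) ((ss.length : Int) + 1)
      = min (mcl?.getD (ss.length : Int)) (ss.length : Int) + 1 := by omega
  simp [this]
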